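-- pv_equiv track=rewrite | github.com/C-Bone-UCL/CrystaLLM-pi | _utils/_processing_utils.py | add_variable_brackets_to_cif
-- ===== SOURCE A (Python) =====
-- def add_variable_brackets_to_cif(cif_str):
--     """Add brackets to variable fields in CIF strings."""
--     lines = cif_str.splitlines()
--     new_lines = []
--     i = 0
--     constant_loop_keys = {"_symmetry_equiv_pos_site_id", "_symmetry_equiv_pos_as_xyz"}
--
--     while i < len(lines):
--         line = lines[i]
--         stripped = line.strip()
--
--         if stripped.startswith("data_"):
--             prefix = "data_"
--             rest = stripped[len(prefix):].strip()
--             if not (rest.startswith("[") and rest.endswith("]")):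
--                 new_line = prefix + "[" + rest + "]"
--             else:
--                 new_line = line
--             new_lines.append(new_line)
--             i += 1
--
--         elif stripped.startswith("loop_"):
--             new_lines.append(line)
--             i += 1
--             headers = []
--             while i < len(lines) and lines[i].strip().startswith("_"):
--                 headers.append(lines[i])
--                 new_lines.append(lines[i])
--                 i += 1
--             is_constant = any(header.split()[0] in constant_loop_keys for header in headers)
--             if not is_constant:
--                 new_lines.append("[")
--             while i < len(lines):
--                 current_line = lines[i]
--                 current_stripped = current_line.strip()
--                 if (current_stripped.startswith("data_") or
--                     current_stripped.startswith("loop_") or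
--                     current_stripped.startswith("_")):
--                     break
--                 new_lines.append(current_line)
--                 i += 1
--             if not is_constant:
--                 new_lines.append("]")
--
--         elif stripped.startswith("_"):
--             parts = line.split(maxsplit=1)
--             if len(parts) == 2:
--                 key, value = parts
--                 value_stripped = value.strip()
--                 if key == "_chemical_formula_sum":
--                     if (value_stripped.startswith("'") and value_stripped.endswith("'")) or \
--                        (value_stripped.startswith('"') and value_stripped.endswith('"')):
--                         value_stripped = value_stripped[1:-1].strip()
--                     value = "'[" + value_stripped + "]'"
--                 else:
--                     if not ((value_stripped.startswith("[") and value_stripped.endswith("]")) or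
--                             (value_stripped.startswith("'") and value_stripped.endswith("'")) or
--                             (value_stripped.startswith('"') and value_stripped.endswith('"'))):
--                         value = "[" + value_stripped + "]"
--                 new_line = key + " " + value
--             else:
--                 new_line = line
--             new_lines.append(new_line)
--             i += 1
--
--         else:
--             new_lines.append(line)
--             i += 1
--
--     return "\n".join(new_lines)
-- ===== SOURCE B (Python) =====
-- def _bracketed(v):
--     return v.startswith("[") and v.endswith("]")
--
--
-- def _quoted(v):
--     return (v.startswith("'") and v.endswith("'")) or (v.startswith('"') and v.endswith('"'))
--
--
-- def _render(seg):
--     kind = seg[0]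
--     if kind == "data":
--         _, line, stripped = seg
--         rest = stripped[5:].strip()
--         return [line] if _bracketed(rest) else ["data_[" + rest + "]"]
--     if kind == "loop":
--         _, line, headers, body = seg
--         constant_loop_keys = {"_symmetry_equiv_pos_site_id", "_symmetry_equiv_pos_as_xyz"}
--         out = [line] + headers
--         if any(h.split()[0] in constant_loop_keys for h in headers):
--             return out + body
--         return out + ["["] + body + ["]"]
--     if kind == "key":
--         _, line = seg
--         parts = line.split(maxsplit=1)
--         if len(parts) != 2:
--             return [line]
--         key, value = parts
--         vs = value.strip()
--         if key == "_chemical_formula_sum":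
--             if _quoted(vs):
--                 vs = vs[1:-1].strip()
--             return [key + " '[" + vs + "]'"]
--         if _bracketed(vs) or _quoted(vs):
--             return [key + " " + value]
--         return [key + " [" + vs + "]"]
--     return [seg[1]]
--
--
-- def add_variable_brackets_to_cif(cif_str):
--     """Add brackets to variable fields in CIF strings."""
--     lines = cif_str.splitlines()
--     n = len(lines)
--     segments = []
--     i = 0
--     while i < n:
--         line = lines[i]
--         s = line.strip()
--         if s.startswith("data_"):
--             segments.append(("data", line, s))
--             i += 1
--         elif s.startswith("loop_"):
--             j = i + 1
--             while j < n and lines[j].strip().startswith("_"):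
--                 j += 1
--             k = j
--             while k < n:
--                 t = lines[k].strip()
--                 if t.startswith("data_") or t.startswith("loop_") or t.startswith("_"):
--                     break
--                 k += 1
--             segments.append(("loop", line, lines[i + 1:j], lines[j:k]))
--             i = k
--         elif s.startswith("_"):
--             segments.append(("key", line))
--             i += 1
--         else:
--             segments.append(("plain", line))
--             i += 1
--     out = []
--     for seg in segments:
--         out.extend(_render(seg))
--     return "\n".join(out)
-- ===== Notes on version B (the rewrite author's own statement) =====
-- stated objective: alternative
-- what changed: A is one index-driven while loop that interleaves scanning and output; B first parses the lines into a list of typed segments (data/loop-with-headers-and-body/key/plain) and then renders each segment independently, joining the rendered pieces.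
import Mathlib
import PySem

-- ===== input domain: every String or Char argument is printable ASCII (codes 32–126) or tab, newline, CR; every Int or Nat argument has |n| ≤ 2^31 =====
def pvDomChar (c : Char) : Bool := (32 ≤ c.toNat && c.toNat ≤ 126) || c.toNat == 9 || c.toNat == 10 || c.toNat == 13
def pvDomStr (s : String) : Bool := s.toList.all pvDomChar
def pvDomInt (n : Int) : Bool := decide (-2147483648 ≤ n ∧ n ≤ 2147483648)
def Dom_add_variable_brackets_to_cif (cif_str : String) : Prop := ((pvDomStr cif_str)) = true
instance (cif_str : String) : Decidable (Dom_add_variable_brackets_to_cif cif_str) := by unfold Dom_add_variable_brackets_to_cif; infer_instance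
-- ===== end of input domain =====

-- ===== PORT A =====
-- B re-implements A as a two-pass pipeline (segment the lines into typed records, then render each record); objective: alternative decomposition, same cost.

-- inner while: gobble loop header lines (strip starts with "_")
def takeHdrsA : List String → List String × List String
  | [] => ([], [])
  | l :: rest =>
    if PySem.Str.startswith (PySem.Str.strip l) "_" then
      let p := takeHdrsA rest
      (l :: p.1, p.2)
    else ([], l :: rest)

-- inner while: gobble loop body lines (until strip starts with data_/loop_/_)
def takeBodyA : List String → List String × List String
  | [] => ([], [])
  | l :: rest =>
    let t := PySem.Str.strip l
    if PySem.Str.startswith t "data_" || PySem.Str.startswith t "loop_" || PySem.Str.startswith t "_" then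
      ([], l :: rest)
    else
      let p := takeBodyA rest
      (l :: p.1, p.2)

theorem takeHdrsA_snd_le (ls : List String) : (takeHdrsA ls).2.length ≤ ls.length := by
  induction ls with
  | nil => simp [takeHdrsA]
  | cons l rest ih =>
    simp only [takeHdrsA]
    split
    · simpa using Nat.le_succ_of_le ih
    · simp

theorem takeBodyA_snd_le (ls : List String) : (takeBodyA ls).2.length ≤ ls.length := by
  induction ls with
  | nil => simp [takeBodyA]
  | cons l rest ih =>
    simp only [takeBodyA]
    split
    · simp
    · simpa using Nat.le_succ_of_le ih

def constantLoopKeysA : PySem.Set String :=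
  PySem.Set.ofList ["_symmetry_equiv_pos_site_id", "_symmetry_equiv_pos_as_xyz"]

-- the outer while loop of A over the remaining lines
def goA (ls : List String) : List String :=
  match ls with
  | [] => []
  | line :: rest =>
    let stripped := PySem.Str.strip line
    if PySem.Str.startswith stripped "data_" then
      -- rest = stripped[len("data_"):].strip()
      let restStr := PySem.Str.strip (PySem.Str.slice stripped (some 5) none)
      let newLine :=
        if !(PySem.Str.startswith restStr "[" && PySem.Str.endswith restStr "]") then
          "data_" ++ "[" ++ restStr ++ "]"
        else line
      newLine :: goA rest
    else if PySem.Str.startswith stripped "loop_" then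
      let p := takeHdrsA rest
      -- header.split()[0]: each header's strip starts with "_", so split() is nonempty and headD is exact
      let isConstant := p.1.any (fun h => PySem.Set.contains constantLoopKeysA ((PySem.Str.split₀ h).headD ""))
      let q := takeBodyA p.2
      line :: (p.1 ++ ((if isConstant then q.1 else "[" :: (q.1 ++ ["]"])) ++ goA q.2))
    else if PySem.Str.startswith stripped "_" then
      let parts := PySem.Str.split₀Max line 1
      let newLine :=
        match parts with
        | [key, value] =>
          let vs := PySem.Str.strip value
          if key == "_chemical_formula_sum" then
            let vs2 :=
              if (PySem.Str.startswith vs "'" && PySem.Str.endswith vs "'") ||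
                 (PySem.Str.startswith vs "\"" && PySem.Str.endswith vs "\"") then
                PySem.Str.strip (PySem.Str.slice vs (some 1) (some (-1)))
              else vs
            key ++ " " ++ ("'[" ++ vs2 ++ "]'")
          else
            if !((PySem.Str.startswith vs "[" && PySem.Str.endswith vs "]") ||
                 (PySem.Str.startswith vs "'" && PySem.Str.endswith vs "'") ||
                 (PySem.Str.startswith vs "\"" && PySem.Str.endswith vs "\"")) then
              key ++ " " ++ ("[" ++ vs ++ "]")
            else key ++ " " ++ value
        | _ => line
      newLine :: goA rest
    else line :: goA rest
termination_by ls.length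
decreasing_by
  · simp
  · simp only [List.length_cons]
    exact Nat.lt_succ_of_le (Nat.le_trans (takeBodyA_snd_le _) (takeHdrsA_snd_le _))
  · simp
  · simp

def add_variable_brackets_to_cif (cif_str : String) : String :=
  PySem.Str.join "\n" (goA (PySem.Str.splitlines cif_str))

-- ===== PORT B =====
inductive CifSeg where
  | dataLine (line stripped : String)
  | loopSeg (line : String) (headers body : List String)
  | keyLine (line : String)
  | plain (line : String)

def isHdrB (l : String) : Bool := PySem.Str.startswith (PySem.Str.strip l) "_"

def isStopB (l : String) : Bool :=
  PySem.Str.startswith (PySem.Str.strip l) "data_" || PySem.Str.startswith (PySem.Str.strip l) "loop_" ||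
    PySem.Str.startswith (PySem.Str.strip l) "_"

-- first pass: group the lines into typed segments
def segsB (ls : List String) : List CifSeg :=
  match ls with
  | [] => []
  | line :: rest =>
    let s := PySem.Str.strip line
    if PySem.Str.startswith s "data_" then CifSeg.dataLine line s :: segsB rest
    else if PySem.Str.startswith s "loop_" then
      let headers := rest.takeWhile isHdrB
      let rest1 := rest.dropWhile isHdrB
      let body := rest1.takeWhile (fun l => !isStopB l)
      let rest2 := rest1.dropWhile (fun l => !isStopB l)
      CifSeg.loopSeg line headers body :: segsB rest2
    else if PySem.Str.startswith s "_" then CifSeg.keyLine line :: segsB rest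
    else CifSeg.plain line :: segsB rest
termination_by ls.length
decreasing_by
  · simp
  · simp only [List.length_cons]
    exact Nat.lt_succ_of_le (Nat.le_trans (List.length_dropWhile_le _ _) (List.length_dropWhile_le _ _))
  · simp
  · simp

def bracketedB (v : String) : Bool := PySem.Str.startswith v "[" && PySem.Str.endswith v "]"

def quotedB (v : String) : Bool :=
  (PySem.Str.startswith v "'" && PySem.Str.endswith v "'") ||
  (PySem.Str.startswith v "\"" && PySem.Str.endswith v "\"")

def constantLoopKeysB : PySem.Set String :=
  PySem.Set.ofList ["_symmetry_equiv_pos_site_id", "_symmetry_equiv_pos_as_xyz"]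

-- second pass: each segment renders independently
def renderB : CifSeg → List String
  | CifSeg.dataLine line s =>
    let rest := PySem.Str.strip (PySem.Str.slice s (some 5) none)
    if bracketedB rest then [line] else ["data_[" ++ rest ++ "]"]
  | CifSeg.loopSeg line headers body =>
    let out := line :: headers
    if headers.any (fun h => PySem.Set.contains constantLoopKeysB ((PySem.Str.split₀ h).headD "")) then
      out ++ body
    else out ++ ("[" :: (body ++ ["]"]))
  | CifSeg.keyLine line =>
    match PySem.Str.split₀Max line 1 with
    | [key, value] =>
      let vs := PySem.Str.strip value
      if key == "_chemical_formula_sum" then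
        let vs2 := if quotedB vs then PySem.Str.strip (PySem.Str.slice vs (some 1) (some (-1))) else vs
        [key ++ " '[" ++ vs2 ++ "]'"]
      else if bracketedB vs || quotedB vs then [key ++ " " ++ value]
      else [key ++ " [" ++ vs ++ "]"]
    | _ => [line]
  | CifSeg.plain line => [line]

def add_variable_brackets_to_cif_alt (cif_str : String) : String :=
  PySem.Str.join "\n" ((segsB (PySem.Str.splitlines cif_str)).flatMap renderB)

-- ===== PRECONDITION & SPEC =====
def Spec_add_variable_brackets_to_cif (cif_str : String) (out : String) : Prop := out = add_variable_brackets_to_cif_alt cif_str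
instance (cif_str : String) (out : String) : Decidable (Spec_add_variable_brackets_to_cif cif_str out) := by unfold Spec_add_variable_brackets_to_cif; infer_instance

-- ===== CLAIM (what is proved, stated in full; the proofs are below) =====
def Claim_equal_add_variable_brackets_to_cif : Prop := ∀ (cif_str : String), Dom_add_variable_brackets_to_cif cif_str → Spec_add_variable_brackets_to_cif cif_str (add_variable_brackets_to_cif cif_str)

-- ===== LEMMAS AND PROOFS =====

theorem takeHdrsA_eq (ls : List String) :
    takeHdrsA ls = (ls.takeWhile isHdrB, ls.dropWhile isHdrB) := by
  induction ls with
  | nil => simp [takeHdrsA]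
  | cons l rest ih =>
    simp only [takeHdrsA, List.takeWhile_cons, List.dropWhile_cons]
    cases h : isHdrB l with
    | true =>
      have h2 : PySem.Str.startswith (PySem.Str.strip l) "_" = true := by simpa [isHdrB] using h
      simp only [if_pos h2, ih]
      simp
    | false =>
      have h2 : ¬ PySem.Str.startswith (PySem.Str.strip l) "_" = true := by simpa [isHdrB] using h
      simp only [if_neg h2]
      simp

theorem takeBodyA_eq (ls : List String) :
    takeBodyA ls = (ls.takeWhile (fun l => !isStopB l), ls.dropWhile (fun l => !isStopB l)) := by
  induction ls with
  | nil => simp [takeBodyA]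
  | cons l rest ih =>
    simp only [takeBodyA, List.takeWhile_cons, List.dropWhile_cons]
    cases h : isStopB l with
    | true =>
      have h2 : (PySem.Str.startswith (PySem.Str.strip l) "data_" || PySem.Str.startswith (PySem.Str.strip l) "loop_" ||
          PySem.Str.startswith (PySem.Str.strip l) "_") = true := by simpa [isStopB] using h
      simp only [if_pos h2]
      simp
    | false =>
      have h2 : ¬ (PySem.Str.startswith (PySem.Str.strip l) "data_" || PySem.Str.startswith (PySem.Str.strip l) "loop_" ||
          PySem.Str.startswith (PySem.Str.strip l) "_") = true := by simpa [isStopB] using h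
      simp only [if_neg h2]
      simp [ih]

theorem goA_eq_flatMap (ls : List String) : goA ls = (segsB ls).flatMap renderB := by
  induction ls using goA.induct with
  | case1 => simp [goA, segsB]
  | case2 line rest stripped hdata ih =>
    have hd : PySem.Str.startswith (PySem.Str.strip line) "data_" = true := hdata
    rw [goA, segsB]
    simp only [if_pos hd, List.flatMap_cons, renderB]
    rw [← ih]
    cases hb : (PySem.Str.startswith (PySem.Str.strip (PySem.Str.slice (PySem.Str.strip line) (some 5) none)) "[" &&
        PySem.Str.endswith (PySem.Str.strip (PySem.Str.slice (PySem.Str.strip line) (some 5) none)) "]") with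
    | true =>
      have hb2 : bracketedB (PySem.Str.strip (PySem.Str.slice (PySem.Str.strip line) (some 5) none)) = true := by
        simpa [bracketedB] using hb
      simp only [hb2, Bool.not_true]
      simp
    | false =>
      have hb2 : bracketedB (PySem.Str.strip (PySem.Str.slice (PySem.Str.strip line) (some 5) none)) = false := by
        simpa [bracketedB] using hb
      simp only [hb2, Bool.not_false]
      simp
  | case3 line rest stripped hdata hloop p q ih =>
    have hd : ¬ PySem.Str.startswith (PySem.Str.strip line) "data_" = true := hdata
    have hl : PySem.Str.startswith (PySem.Str.strip line) "loop_" = true := hloop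
    rw [goA, segsB]
    simp only [if_neg hd, if_pos hl, List.flatMap_cons, renderB]
    have ih0 : goA ((takeBodyA (takeHdrsA rest).2).2) =
        List.flatMap renderB (segsB ((takeBodyA (takeHdrsA rest).2).2)) := ih
    simp only [takeHdrsA_eq, takeBodyA_eq, constantLoopKeysA, constantLoopKeysB] at ih0 ⊢
    rw [← ih0]
    by_cases hc : ((List.takeWhile isHdrB rest).any
        (fun h => PySem.Set.contains (PySem.Set.ofList ["_symmetry_equiv_pos_site_id", "_symmetry_equiv_pos_as_xyz"])
          ((PySem.Str.split₀ h).headD ""))) = true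
    · simp only [if_pos hc]
      simp
    · simp only [if_neg hc]
      simp
  | case4 line rest stripped hdata hloop hkey ih =>
    have hd : ¬ PySem.Str.startswith (PySem.Str.strip line) "data_" = true := hdata
    have hl : ¬ PySem.Str.startswith (PySem.Str.strip line) "loop_" = true := hloop
    have hk0 : PySem.Str.startswith (PySem.Str.strip line) "_" = true := hkey
    rw [goA, segsB]
    simp only [if_neg hd, if_neg hl, if_pos hk0, List.flatMap_cons, renderB]
    rw [← ih]
    cases hp : PySem.Str.split₀Max line 1 with
    | nil => simp
    | cons a t =>
      cases t with
      | nil => simp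
      | cons b t2 =>
        cases t2 with
        | nil =>
          dsimp only
          by_cases hk : ((a == "_chemical_formula_sum")) = true
          · simp only [if_pos hk, quotedB]
            by_cases hq : ((PySem.Str.startswith (PySem.Str.strip b) "'" && PySem.Str.endswith (PySem.Str.strip b) "'") ||
                (PySem.Str.startswith (PySem.Str.strip b) "\"" && PySem.Str.endswith (PySem.Str.strip b) "\"")) = true
            · simp only [if_pos hq]
              rw [show (" '[" : String) = " " ++ "'[" from by decide]
              simp only [String.append_assoc, List.cons_append, List.nil_append]
            · simp only [if_neg hq]
              rw [show (" '[" : String) = " " ++ "'[" from by decide]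
              simp only [String.append_assoc, List.cons_append, List.nil_append]
          · simp only [if_neg hk, bracketedB, quotedB]
            by_cases hc : ((PySem.Str.startswith (PySem.Str.strip b) "[" && PySem.Str.endswith (PySem.Str.strip b) "]") ||
                (PySem.Str.startswith (PySem.Str.strip b) "'" && PySem.Str.endswith (PySem.Str.strip b) "'") ||
                (PySem.Str.startswith (PySem.Str.strip b) "\"" && PySem.Str.endswith (PySem.Str.strip b) "\"")) = true
            · have hc2 : ((PySem.Str.startswith (PySem.Str.strip b) "[" && PySem.Str.endswith (PySem.Str.strip b) "]") || ((PySem.Str.startswith (PySem.Str.strip b) "'" && PySem.Str.endswith (PySem.Str.strip b) "'") || (PySem.Str.startswith (PySem.Str.strip b) "\"" && PySem.Str.endswith (PySem.Str.strip b) "\""))) = true := by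
                rw [← Bool.or_assoc]; exact hc
              rw [if_pos hc2]
              simp only [hc, Bool.not_true]
              simp
            · have hc2 : ¬ ((PySem.Str.startswith (PySem.Str.strip b) "[" && PySem.Str.endswith (PySem.Str.strip b) "]") || ((PySem.Str.startswith (PySem.Str.strip b) "'" && PySem.Str.endswith (PySem.Str.strip b) "'") || (PySem.Str.startswith (PySem.Str.strip b) "\"" && PySem.Str.endswith (PySem.Str.strip b) "\""))) = true := by
                rw [← Bool.or_assoc]; exact hc
              rw [if_neg hc2]
              have hc' : ((PySem.Str.startswith (PySem.Str.strip b) "[" && PySem.Str.endswith (PySem.Str.strip b) "]") ||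
                  (PySem.Str.startswith (PySem.Str.strip b) "'" && PySem.Str.endswith (PySem.Str.strip b) "'") ||
                  (PySem.Str.startswith (PySem.Str.strip b) "\"" && PySem.Str.endswith (PySem.Str.strip b) "\"")) = false := by
                simpa using hc
              simp only [hc', Bool.not_false]
              rw [show (" [" : String) = " " ++ "[" from by decide]
              simp only [String.append_assoc, List.cons_append, List.nil_append]
              simp
        | cons c t3 => simp
  | case5 line rest stripped hdata hloop hkey ih =>
    have hd : ¬ PySem.Str.startswith (PySem.Str.strip line) "data_" = true := hdata
    have hl : ¬ PySem.Str.startswith (PySem.Str.strip line) "loop_" = true := hloop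
    have hk0 : ¬ PySem.Str.startswith (PySem.Str.strip line) "_" = true := hkey
    rw [goA, segsB]
    simp only [if_neg hd, if_neg hl, if_neg hk0]
    simp [renderB, ← ih]

-- ===== VERDICT (by name: the statement is the Claim_ definition above) =====
theorem add_variable_brackets_to_cif_spec : Claim_equal_add_variable_brackets_to_cif := by
  intro cif_str _
  unfold Spec_add_variable_brackets_to_cif add_variable_brackets_to_cif add_variable_brackets_to_cif_alt
  rw [goA_eq_flatMap]
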